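-- pv_equiv track=rewrite | github.com/woodongk/python-algorithm-study | Programmers/카카오 기출/2020 카카오 인턴십/키패드 누르기.py | bfs
-- ===== SOURCE A (Python) =====
-- import collections
--
-- dx = [-1, 1, 0, 0]
--
-- dy = [0, 0, -1, 1]
--
-- def bfs(start):
--
--     queue = collections.deque([start])
--     dist = [[-1] * 3 for _ in range(4)] # 경로를 -1 으로 초기화
--     dist[start[0]][start[1]] = 0
--
--     while queue:
--         x, y = queue.popleft()
--         for i in range(4):
--             nx = x + dx[i]
--             ny = y + dy[i]
--             if 0 <= nx < 4 and 0 <= ny < 3: # 갈 수 있는 길이라면,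
--                 if dist[nx][ny] == -1: # 아직 방문하지 않았다면 ( 경로 최단 거리 위해 )
--                     dist[nx][ny] = dist[x][y] + 1
--                     queue.append((nx, ny))
--
--     return dist
-- ===== SOURCE B (Python) =====
-- def bfs(start):
--     # Level-synchronous BFS: expand whole frontiers, the distance is the level number.
--     dist = [[-1] * 3 for _ in range(4)]
--     dist[start[0]][start[1]] = 0
--     frontier = [start]
--     level = 0
--     while frontier:
--         level += 1
--         nxt = []
--         for x, y in frontier:
--             for nx, ny in ((x - 1, y), (x + 1, y), (x, y - 1), (x, y + 1)):
--                 if 0 <= nx < 4 and 0 <= ny < 3 and dist[nx][ny] == -1: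
--                     dist[nx][ny] = level
--                     nxt.append((nx, ny))
--         frontier = nxt
--     return dist
-- ===== Notes on version B (the rewrite author's own statement) =====
-- stated objective: alternative
-- what changed: Replaces the deque-based vertex-at-a-time BFS (popleft, dx/dy offset arrays, new distance read back as dist[x][y]+1) with a level-synchronous BFS: whole frontiers are expanded at once and the distance written is the level counter; no deque, no offset arrays, no distance reads from the grid.
import Mathlib
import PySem

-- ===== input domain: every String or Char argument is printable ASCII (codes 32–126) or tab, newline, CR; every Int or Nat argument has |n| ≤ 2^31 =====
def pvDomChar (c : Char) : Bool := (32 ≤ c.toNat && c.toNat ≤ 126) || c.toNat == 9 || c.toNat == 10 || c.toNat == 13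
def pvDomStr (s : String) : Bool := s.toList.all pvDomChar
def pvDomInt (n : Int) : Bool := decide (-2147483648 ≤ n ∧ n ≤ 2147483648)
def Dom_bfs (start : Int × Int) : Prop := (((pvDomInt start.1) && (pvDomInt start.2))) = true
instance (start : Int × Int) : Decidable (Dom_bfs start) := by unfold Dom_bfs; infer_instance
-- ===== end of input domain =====

-- B replaces the deque BFS by a level-synchronous frontier BFS (no queue, no dx/dy arrays,
-- the distance is the level counter); same return value wherever A returns.

-- ===== PORT A =====
-- Python negative indexing: an index i into a list of length n means i+n when i < 0.
def pyIdxWrap (n : Nat) (i : Int) : Nat := if i < 0 then (i + n).toNat else i.toNat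

-- dist[x][y] (Python read, wrap semantics)
def get2 (d : List (List Int)) (x y : Int) : Int :=
  (d.getD (pyIdxWrap 4 x) []).getD (pyIdxWrap 3 y) 0

-- dist[x][y] = v (Python write, wrap semantics)
def set2 (d : List (List Int)) (x y : Int) (v : Int) : List (List Int) :=
  d.set (pyIdxWrap 4 x) ((d.getD (pyIdxWrap 4 x) []).set (pyIdxWrap 3 y) v)

def dxA : List Int := [-1, 1, 0, 0]
def dyA : List Int := [0, 0, -1, 1]

-- the 'while queue:' loop; fuel only makes the recursion structural (32 iterations suffice:
-- every pop consumes one enqueue and at most 1 + 12 cells are ever enqueued)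
def bfsLoop : Nat → List (Int × Int) → List (List Int) → List (List Int)
  | 0, _, dist => dist
  | _ + 1, [], dist => dist
  | fuel + 1, (x, y) :: queue, dist =>
      let s := (List.range 4).foldl
        (fun (s : List (Int × Int) × List (List Int)) i =>
          let nx := x + dxA.getD i 0
          let ny := y + dyA.getD i 0
          if 0 ≤ nx ∧ nx < 4 ∧ 0 ≤ ny ∧ ny < 3 then
            if get2 s.2 nx ny = -1 then
              (s.1 ++ [(nx, ny)], set2 s.2 nx ny (get2 s.2 x y + 1))
            else s
          else s)
        (queue, dist)
      bfsLoop fuel s.1 s.2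

def bfs (start : Int × Int) : List (List Int) :=
  let dist0 := List.replicate 4 (List.replicate 3 (-1 : Int))
  let dist1 := set2 dist0 start.1 start.2 0
  bfsLoop 32 [start] dist1

-- ===== PORT B =====
-- dist[x][y] read / write with Python list-index semantics (negative wraps), for B's code
def readCell (d : List (List Int)) (p : Int × Int) : Int :=
  (d.getD (if p.1 < 0 then (p.1 + 4).toNat else p.1.toNat) []).getD
    (if p.2 < 0 then (p.2 + 3).toNat else p.2.toNat) 0

def writeCell (d : List (List Int)) (p : Int × Int) (v : Int) : List (List Int) :=
  let r := if p.1 < 0 then (p.1 + 4).toNat else p.1.toNat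
  d.set r ((d.getD r []).set (if p.2 < 0 then (p.2 + 3).toNat else p.2.toNat) v)

-- the 'while frontier:' loop of Source B; fuel makes it structural (16 levels suffice on 12 cells)
def levelLoop : Nat → Int → List (Int × Int) → List (List Int) → List (List Int)
  | 0, _, _, dist => dist
  | _ + 1, _, [], dist => dist
  | fuel + 1, level, frontier, dist =>
      let s := frontier.foldl
        (fun (s : List (Int × Int) × List (List Int)) p =>
          [(p.1 - 1, p.2), (p.1 + 1, p.2), (p.1, p.2 - 1), (p.1, p.2 + 1)].foldl
            (fun (s : List (Int × Int) × List (List Int)) q =>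
              if 0 ≤ q.1 ∧ q.1 < 4 ∧ 0 ≤ q.2 ∧ q.2 < 3 ∧ readCell s.2 q = -1 then
                (s.1 ++ [q], writeCell s.2 q (level + 1))
              else s)
            s)
        ([], dist)
      levelLoop fuel (level + 1) s.1 s.2

def bfs_alt (start : Int × Int) : List (List Int) :=
  let dist := writeCell (List.replicate 4 (List.replicate 3 (-1 : Int))) start 0
  levelLoop 16 0 [start] dist

-- ===== PRECONDITION & SPEC =====
-- Pre_ excludes exactly the starts on which the Python programs raise IndexError:
-- a coordinate beyond Python's negative-index range for the 4-row / 3-column grid.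
def Pre_bfs (start : Int × Int) : Prop :=
  -4 ≤ start.1 ∧ start.1 < 4 ∧ -3 ≤ start.2 ∧ start.2 < 3
instance (start : Int × Int) : Decidable (Pre_bfs start) := by unfold Pre_bfs; infer_instance

def pvWitness_bfs : (Int × Int) := (1, 0)

def Spec_bfs (start : Int × Int) (out : List (List Int)) : Prop := out = bfs_alt start
instance (start : Int × Int) (out : List (List Int)) : Decidable (Spec_bfs start out) := by unfold Spec_bfs; infer_instance

-- ===== CLAIM (what is proved, stated in full; the proofs are below) =====
def Claim_equal_bfs : Prop := ∀ (start : Int × Int), Dom_bfs start → Pre_bfs start → Spec_bfs start (bfs start)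

-- ===== LEMMAS AND PROOFS =====

-- ===== VERDICT (by name: the statement is the Claim_ definition above) =====
set_option maxRecDepth 4000 in
theorem bfs_spec : Claim_equal_bfs := by
  unfold Claim_equal_bfs
  rintro ⟨x, y⟩ _ ⟨hx0, hx1, hy0, hy1⟩
  unfold Spec_bfs
  interval_cases x <;> interval_cases y <;> decide
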